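-- pv_equiv track=rewrite | github.com/benjaminfjones/match-sticks | toms_algorithm.py | count_valid_edge_sets
-- ===== SOURCE A (Python) =====
-- from functools import reduce
-- from typing import List
--
-- def digits(z: int, base=10) -> List[int]:
--     """
--     Return the list of digits of `z` in base `base`, least significant digits first.
--
--     Base `base` digits are represented as integers.
--
--     Examples:
--
--     >>> digits(10, base=2)
--     [0, 1, 0, 1]
--     >>> digits(10)
--     [0, 1]
--     >>> digits(116, base=31)
--     [23, 3]
--     """
--     res = []
--     while True:
--         q, r = divmod(z, base)
--         res.append(r)
--         if q == 0:
--             return res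
--         z = z // base
--
-- def count(z: int, j: int, b: int, m: int) -> int:
--     """
--     Count something mysterious.
--
--     Time complexity is O(log_b(z)).
--
--     TODO:
--         - document parameters, all non-negative ints
--         - describe what this counts
--     """
--     ds = digits(z, base=b)
--     n_zeros = 0
--     if j in ds:
--         ds = ds[:ds.index(j)]
--     else:
--         if m <= len(ds):
--             ds = ds[:m]
--         else:
--             n_zeros = m - len(ds)
--     return sum(1 for d in ds if d <= j) + n_zeros + 2
--
-- def count_valid_edge_sets(m: int, n: int) -> int:
--     """
--     Return the number of valid edge sets in the `m` x `n` rectangular grid.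
--
--     Example:
--
--     >>> [count_valid_edge_sets(i, i) for i in range(7)]
--     [1, 7, 115, 3451, 164731, 11467387, 1096832395]
--
--     Try this and go get a cup of coffee:
--
--     >>> count_valid_edge_sets(8, 8)
--     22111390122811
--     """
--     if n == 0:
--         return 2**m
--     return sum(
--         (
--             reduce(lambda x, y: x*y, (count(i, j, n+2, m) for j in range(1, n+1)))
--             for i in range((n+2)**m)
--         )
--     )
-- ===== SOURCE B (Python) =====
-- from functools import lru_cache
--
-- def count_valid_edge_sets(m: int, n: int) -> int:
--     """Polynomial-time combinatorial DP instead of brute-force enumeration of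
--     all (n+2)**m digit strings.
--
--     Group the digit strings by the subsequence of digits <= j, level by level.
--     pas(k, a) counts the ways to interleave a copies of a new largest digit
--     into a sequence of length k (Pascal's rule); w(k, a) is the same count
--     weighted by (2 + position of the first new digit) (or 2 + k when a == 0),
--     i.e. the factor the original formula assigns to that digit value.  Then
--     dp[k], the weighted count of strings over {0..j} of length k, satisfies
--     dp'[k] = sum_l dp[l] * w(k, k-l), and the answer interleaves the inert
--     top digit n+1 with plain binomial weights pas(m, m-k).
--     """
--     if n == 0:
--         return 2 ** m
--
--     @lru_cache(maxsize=None)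
--     def pas(k: int, a: int) -> int:
--         if a == 0:
--             return 1
--         if a > k:
--             return 0
--         return pas(k - 1, a - 1) + pas(k - 1, a)
--
--     @lru_cache(maxsize=None)
--     def w(k: int, a: int) -> int:
--         if a == 0:
--             return k + 2
--         if a > k:
--             return 0
--         return 2 * pas(k - 1, a - 1) + w(k - 1, a) + pas(k - 1, a)
--
--     dp = [1] * (m + 1)
--     for _ in range(n):
--         dp = [sum(dp[l] * w(k, k - l) for l in range(k + 1)) for k in range(m + 1)]
--     return sum(pas(m, m - k) * dp[k] for k in range(m + 1))
-- ===== Notes on version B (the rewrite author's own statement) =====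
-- stated objective: faster
-- what changed: B replaces A's enumeration of all (n+2)**m digit strings by a combinatorial DP polynomial in m and n: it groups strings by the subsequence of digits <= j level by level, counts interleavings of each new digit value with Pascal numbers pas(k,a) and a first-occurrence-weighted table w(k,a), and folds dp'[k] = sum_l dp[l]*w(k,k-l) over j = 1..n, finishing with binomial weights for the inert digit n+1 (intended as faster; a timing run could not measure a ratio because A times out at the sizes where time becomes measurable).
-- outside the precondition, e.g. on count_valid_edge_sets(1, -2): A returns 0, B returns 2; on count_valid_edge_sets(-1, 0): A returns 0.5, B returns 0.5; on count_valid_edge_sets(0, -1): A raises TypeError, B returns 1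
import Mathlib
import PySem

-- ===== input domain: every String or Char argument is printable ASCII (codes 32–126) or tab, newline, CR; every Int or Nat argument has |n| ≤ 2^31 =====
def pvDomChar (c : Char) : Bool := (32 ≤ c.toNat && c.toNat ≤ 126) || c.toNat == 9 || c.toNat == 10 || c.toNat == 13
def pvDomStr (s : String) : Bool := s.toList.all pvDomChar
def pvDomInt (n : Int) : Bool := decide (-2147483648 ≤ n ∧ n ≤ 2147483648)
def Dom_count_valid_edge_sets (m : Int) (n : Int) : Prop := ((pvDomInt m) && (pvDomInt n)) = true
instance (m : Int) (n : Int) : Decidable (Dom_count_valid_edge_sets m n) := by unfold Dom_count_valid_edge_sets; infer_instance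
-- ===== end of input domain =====

-- B replaces A's enumeration of all (n+2)^m digit strings by a combinatorial DP over
-- interleaving counts, polynomial in m and n; intended as faster (a timing run could
-- not measure a ratio: A already times out at the sizes where time becomes measurable).

-- ===== PORT A =====

-- digits(z, base): LSB-first digit list.  For 2 ≤ base and 0 ≤ z (the only calls
-- count_valid_edge_sets makes under Pre_) this is exact; on other inputs the Python
-- loop diverges or raises, so the [r] fallback there is unreachable from the entry point.
def digitsA (z : Int) (base : Int) : List Int :=
  let q := PySem.Int.floordiv z base
  let r := PySem.Int.mod z base
  if q = 0 then [r]
  else if h : 2 ≤ base ∧ 1 ≤ z then r :: digitsA q base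
  else [r]
termination_by z.toNat
decreasing_by
  rename_i hq
  have hb : (0:Int) < base := by omega
  have hf : PySem.Int.floordiv z base = z / base := PySem.Int.floordiv_eq_ediv_of_pos hb
  have he : z / base = ((z.toNat / base.toNat : Nat) : Int) := by
    rw [(by omega : z = (z.toNat : Int)), (by omega : base = (base.toNat : Int))]
    exact (Int.natCast_ediv _ _).symm
  have hlt : z.toNat / base.toNat < z.toNat := Nat.div_lt_self (by omega) (by omega)
  omega

-- count(z, j, b, m); ds[:k] with k = ds.index(j) ≥ 0 ported via PySem.List.slice
def countA (z : Int) (j : Int) (b : Int) (m : Int) : Int :=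
  let ds := digitsA z b
  let p : List Int × Int :=
    if ds.contains j then
      (PySem.List.slice ds none (some (((PySem.List.index? ds j).getD 0 : Nat) : Int)), 0)
    else if m ≤ (ds.length : Int) then
      (PySem.List.slice ds none (some m), 0)
    else (ds, m - (ds.length : Int))
  (p.1.foldl (fun s d => if d ≤ j then s + 1 else s) 0) + p.2 + 2

-- functools.reduce(f, xs) without initial value; reduce of an empty sequence raises
-- in Python, so the [] => 0 arm is unreachable from count_valid_edge_sets under Pre_ (n ≥ 1 there)
def reduce1 (f : Int → Int → Int) : List Int → Int
  | [] => 0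
  | x :: rest => rest.foldl f x

def count_valid_edge_sets (m : Int) (n : Int) : Int :=
  if n = 0 then 2 ^ m.toNat   -- 2**m; exact for 0 ≤ m (Pre_)
  else
    -- sum over i in range((n+2)**m) of reduce(mul, (count(i,j,n+2,m) for j in 1..n))
    (PySem.List.pyRange 0 ((n+2) ^ m.toNat) 1).foldl
      (fun acc i =>
        acc + reduce1 (· * ·) ((PySem.List.pyRange 1 (n+1) 1).map (fun j => countA i j (n+2) m))) 0

-- ===== PORT B =====

-- pas(k, a): Pascal-recursion binomial (number of interleavings of a new digits)
def pasB : Nat → Nat → Int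
  | _, 0 => 1
  | 0, _+1 => 0
  | k+1, a+1 => pasB k a + pasB k (a+1)

-- w(k, a): interleavings weighted by (2 + position of the first new digit)
def wB : Nat → Nat → Int
  | k, 0 => (k : Int) + 2
  | 0, _+1 => 0
  | k+1, a+1 => 2 * pasB k a + wB k (a+1) + pasB k (a+1)

-- dp = [1]*(m+1); n times dp = [sum(dp[l]*w(k,k-l)) for k]; sum(pas(m,m-k)*dp[k]).
-- range(m+1) and [1]*(m+1) have (m+1).toNat elements, exactly as in Python;
-- pas's Nat arguments match Python's since pas is only reached with 0 ≤ k ≤ m.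
def count_valid_edge_sets_alt (m : Int) (n : Int) : Int :=
  if n = 0 then 2 ^ m.toNat
  else
    let M1 := (m+1).toNat
    let dp := (PySem.List.pyRange 0 n 1).foldl
      (fun dp _ => (List.range M1).map
        (fun k => ((List.range (k+1)).map (fun l => dp.getD l 0 * wB k (k-l))).sum))
      (List.replicate M1 (1:Int))
    ((List.range M1).map (fun k => pasB m.toNat (m.toNat-k) * dp.getD k 0)).sum

-- ===== PRECONDITION & SPEC =====
-- Pre_ excludes negative m (Python A returns a float 2**m, not an int) and negative n
-- (A raises TypeError on reduce of an empty generator, except on shapes where an empty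
-- range makes it return an accidental 0).
def Pre_count_valid_edge_sets (m : Int) (n : Int) : Prop := 0 ≤ m ∧ 0 ≤ n
instance (m : Int) (n : Int) : Decidable (Pre_count_valid_edge_sets m n) := by
  unfold Pre_count_valid_edge_sets; infer_instance

def pvWitness_count_valid_edge_sets : Int × Int := (2, 2)

def Spec_count_valid_edge_sets (m : Int) (n : Int) (out : Int) : Prop :=
  out = count_valid_edge_sets_alt m n
instance (m : Int) (n : Int) (out : Int) : Decidable (Spec_count_valid_edge_sets m n out) := by
  unfold Spec_count_valid_edge_sets; infer_instance

-- ===== CLAIM (what is proved, stated in full; the proofs are below) =====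
def Claim_equal_count_valid_edge_sets : Prop :=
  ∀ (m : Int) (n : Int), Dom_count_valid_edge_sets m n → Pre_count_valid_edge_sets m n →
    Spec_count_valid_edge_sets m n (count_valid_edge_sets m n)

-- ===== LEMMAS AND PROOFS =====

-- the inner per-j factor of A, extracted: count of digits ≤ j before the first j
def scanB (j : Int) : List Int → Int
  | [] => 0
  | d :: t => if d = j then 0 else (if d ≤ j then 1 else 0) + scanB j t

-- the LSB-first digit tuple of i, zero-padded to length K
def tup (B : Nat) (i : Nat) : Nat → List Int
  | 0 => []
  | (K+1) => ((i % B : Nat) : Int) :: tup B (i / B) K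

-- all length-k digit strings over {0..b-1}, LSB first
def tupAll (b : Nat) : Nat → List (List Int)
  | 0 => [[]]
  | k+1 => (List.range b).flatMap (fun d => (tupAll b k).map (fun t => ((d : Nat) : Int) :: t))

-- remove every occurrence of the digit c
def strip (c : Int) (t : List Int) : List Int := t.filter (fun d => !(d == c))

-- the product of A's factors for j = 1..J
def Pprod (J : Nat) (t : List Int) : Int :=
  ((List.range J).map (fun i : Nat => scanB (1 + (i : Int)) t + 2)).prod

-- the DP table B computes: Dp j k = weighted count of strings over {0..j} of length k
def Dp : Nat → Nat → Int
  | 0, _ => 1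
  | j+1, k => ∑ l ∈ Finset.range (k+1), Dp j l * wB k (k-l)

-- sum of F over all strings over {0..j-1} of length l
def SS (j : Nat) (F : List Int → Int) (l : Nat) : Int := ((tupAll j l).map F).sum

theorem tup_zero (B : Nat) (K : Nat) : tup B 0 K = List.replicate K 0 := by
  induction K with
  | zero => rfl
  | succ K ih => simp [tup, ih, List.replicate_succ]

theorem digitsA_natCast (B i : Nat) (hB : 2 ≤ B) :
    digitsA (i : Int) (B : Int) =
      ((i % B : Nat) : Int) :: (if i / B = 0 then [] else digitsA ((i / B : Nat) : Int) (B : Int)) := by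
  rw [digitsA]
  have hf : PySem.Int.floordiv (i:Int) (B:Int) = ((i / B : Nat) : Int) := by
    simp [PySem.Int.floordiv_natCast]
  have hm : PySem.Int.mod (i:Int) (B:Int) = ((i % B : Nat) : Int) := by
    simp [PySem.Int.mod_natCast]
  by_cases h : i / B = 0
  · simp [hf, hm, h]
  · have hBi : B ≤ i := by
      by_contra hc
      exact h (Nat.div_eq_of_lt (by omega))
    have h1 : ¬ (((i / B : Nat) : Int) = 0) := by
      simp only [ne_eq, Int.natCast_eq_zero]; exact h
    have h2 : 2 ≤ (B:Int) ∧ 1 ≤ (i:Int) :=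
      ⟨by exact_mod_cast hB, by exact_mod_cast Nat.one_le_iff_ne_zero.mpr (by omega)⟩
    simp [hf, hm, h1, h2, h]
    intro hc
    exfalso
    rw [← Int.natCast_ediv] at hc
    exact h (by exact_mod_cast hc)

-- pad/length relation between digitsA and tup
theorem tup_eq_digits_pad (B : Nat) (hB : 2 ≤ B) :
    ∀ (K : Nat) (i : Nat), 1 ≤ K → i < B ^ K →
      (digitsA (i : Int) (B : Int)).length ≤ K ∧
      tup B i K = digitsA (i : Int) (B : Int) ++
        List.replicate (K - (digitsA (i : Int) (B : Int)).length) (0 : Int) := by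
  intro K
  induction K with
  | zero => intro i h; omega
  | succ K ih =>
    intro i _ hi
    rw [digitsA_natCast B i hB]
    by_cases h : i / B = 0
    · simp only [h, if_pos rfl, if_true]
      refine ⟨by simp, ?_⟩
      simp [tup, h, tup_zero]
    · have hK : 1 ≤ K := by
        by_contra hc
        have hK0 : K = 0 := by omega
        subst hK0
        rw [pow_one] at hi
        exact h (Nat.div_eq_of_lt hi)
      have hi' : i / B < B ^ K := by
        rw [Nat.div_lt_iff_lt_mul (by omega)]
        rw [← pow_succ]
        exact hi
      obtain ⟨h1, h2⟩ := ih (i / B) hK hi'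
      simp only [if_neg h]
      refine ⟨by rw [List.length_cons]; omega, ?_⟩
      simp only [tup, h2, List.cons_append, List.length_cons]
      rw [Nat.succ_sub_succ]

-- counting loop = countP
theorem foldl_cnt (j : Int) (l : List Int) (s : Int) :
    l.foldl (fun s d => if d ≤ j then s + 1 else s) s = s + (l.countP (fun d => decide (d ≤ j)) : Int) := by
  induction l generalizing s with
  | nil => simp
  | cons a l ih => by_cases h : a ≤ j <;> simp [List.countP_cons, h, ih] <;> ring

theorem scanB_not_mem (j : Int) (l : List Int) (h : j ∉ l) :
    scanB j l = (l.countP (fun d => decide (d ≤ j)) : Int) := by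
  induction l with
  | nil => simp [scanB]
  | cons a l ih =>
      simp only [List.mem_cons, not_or] at h
      by_cases ha : a ≤ j <;>
        simp [scanB, List.countP_cons, ha, Ne.symm h.1, ih h.2] <;> push_cast <;> ring

theorem scanB_append_not_mem (j : Int) (u v : List Int) (h : j ∉ u) :
    scanB j (u ++ v) = (u.countP (fun d => decide (d ≤ j)) : Int) + scanB j v := by
  induction u with
  | nil => simp
  | cons a u ih =>
      simp only [List.mem_cons, not_or] at h
      by_cases ha : a ≤ j <;>
        simp [scanB, List.countP_cons, ha, Ne.symm h.1, ih h.2] <;> push_cast <;> ring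

theorem scanB_replicate_zero (j : Int) (hj : 1 ≤ j) (z : Nat) :
    scanB j (List.replicate z (0 : Int)) = (z : Int) := by
  induction z with
  | zero => simp [scanB]
  | succ z ih =>
      have : j ≠ 0 := by omega
      simp [List.replicate_succ, scanB, ih, (by omega : ¬ ((0:Int) = j)), (by omega : (0:Int) ≤ j)]
      omega

theorem scanB_mem (j : Int) (pre suf : List Int) (h : j ∉ pre) :
    scanB j (pre ++ j :: suf) = (pre.countP (fun d => decide (d ≤ j)) : Int) := by
  rw [scanB_append_not_mem j pre _ h]
  simp [scanB]

-- the per-index factor of A equals the break-scan factor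
theorem countA_eq_scan (B : Nat) (hB : 2 ≤ B) (K : Nat) (i : Nat) (hi : i < B ^ K)
    (j : Int) (hj : 1 ≤ j) :
    countA (i : Int) j (B : Int) (K : Int) = scanB j (tup B i K) + 2 := by
  have hjne : ∀ x : Int, x = 0 → ¬ (j = x) := by intro x hx; omega
  rcases Nat.eq_zero_or_pos K with hK | hK
  · subst hK
    have hi0 : i = 0 := by simpa using hi
    subst hi0
    have hds : digitsA ((0:Nat) : Int) ((B:Nat) : Int) = [0] := by
      rw [digitsA_natCast B 0 hB]
      simp
    simp only [countA, hds]
    have hcon : ¬ ([(0:Int)].contains j = true) := by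
      simp [List.contains_cons]
      omega
    have hm2 : ((0:Nat):Int) ≤ (([(0:Int)].length : Nat) : Int) := by simp
    simp only [if_neg hcon, if_pos hm2]
    rw [PySem.List.slice_to_natCast]
    simp [tup, scanB]
  · obtain ⟨hlen, htup⟩ := tup_eq_digits_pad B hB K i hK hi
    simp only [countA]
    set ds := digitsA ((i:Nat) : Int) ((B:Nat) : Int) with hds
    by_cases hc : ds.contains j = true
    · have hmem : j ∈ ds := by simpa using hc
      have hsome : (PySem.List.index? ds j).isSome := (PySem.List.index?_isSome_iff ds j).mpr hmem
      obtain ⟨k, hk⟩ := Option.isSome_iff_exists.mp hsome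
      obtain ⟨pre, suf, hsplit, hklen, hpre⟩ := (PySem.List.index?_eq_some_iff ds j k).mp hk
      simp only [if_pos hc, hk]
      rw [Option.getD_some]
      rw [PySem.List.slice_to_natCast]
      have htake : ds.take k = pre := by
        rw [hsplit, ← hklen, List.take_left]
      rw [htake, foldl_cnt]
      have hscan : scanB j (tup B i K) = (pre.countP (fun d => decide (d ≤ j)) : Int) := by
        rw [htup, hsplit]
        rw [List.append_assoc, List.cons_append]
        exact scanB_mem j pre _ hpre
      rw [hscan]
      ring
    · have hnm : j ∉ ds := by simpa using hc
      simp only [if_neg hc]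
      by_cases hm2 : (K : Int) ≤ (ds.length : Int)
      · have hlenK : ds.length = K := by omega
        simp only [if_pos hm2]
        have hsl : PySem.List.slice ds none (some ((K:Nat) : Int)) = ds := by
          rw [PySem.List.slice_to_natCast, ← hlenK]
          exact List.take_length
        rw [hsl, foldl_cnt]
        rw [htup, hlenK, Nat.sub_self, List.replicate_zero, List.append_nil]
        rw [scanB_not_mem j ds hnm]
        ring
      · simp only [if_neg hm2]
        rw [foldl_cnt]
        have hlt : ds.length < K := by omega
        rw [htup]
        rw [scanB_append_not_mem j ds _ hnm]
        rw [scanB_replicate_zero j hj]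
        push_cast [Nat.cast_sub (le_of_lt hlt)]
        ring

theorem list_range_map_sum (N : Nat) (f : Nat → Int) :
    ((List.range N).map f).sum = ∑ i ∈ Finset.range N, f i := rfl

-- a fold that ignores its counter is an iteration, length-many times
theorem foldl_iterate {α β : Type} (l : List α) (g : β → β) (init : β) :
    l.foldl (fun ts _ => g ts) init = g^[l.length] init := by
  induction l generalizing init with
  | nil => rfl
  | cons a l ih => simp [List.foldl_cons, Function.iterate_succ_apply, ih]

-- ---- the scan ignores digits larger than its threshold ----

theorem strip_cons (c d : Int) (t : List Int) :
    strip c (d :: t) = if d = c then strip c t else d :: strip c t := by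
  by_cases hd : d = c <;> simp [strip, List.filter_cons, hd]

theorem scan_strip (i c : Int) (h : i < c) (t : List Int) :
    scanB i (strip c t) = scanB i t := by
  induction t with
  | nil => rfl
  | cons d t ih =>
    rw [strip_cons]
    by_cases hd : d = c
    · subst hd
      simp [scanB, ih, (show ¬ (d = i) by omega), (show ¬ (d ≤ i) by omega)]
    · simp only [if_neg hd]
      by_cases hi : d = i <;> simp [scanB, hi, ih]

theorem Pprod_succ (J : Nat) (t : List Int) :
    Pprod (J+1) t = Pprod J t * (scanB (1 + (J : Int)) t + 2) := by
  simp [Pprod, List.range_succ]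

theorem Pprod_strip (J : Nat) (c : Int) (hc : (J : Int) < c) (t : List Int) :
    Pprod J (strip c t) = Pprod J t := by
  induction J with
  | zero => simp [Pprod]
  | succ J ih =>
    have hc' : (J : Int) < c := by push_cast at hc ⊢; omega
    rw [Pprod_succ, Pprod_succ, ih hc', scan_strip _ _ (by push_cast at hc ⊢; omega)]

-- ---- boundary zeros of the tables ----

theorem pasB_zero (k : Nat) : pasB k 0 = 1 := by cases k <;> rfl

theorem wB_zero (k : Nat) : wB k 0 = (k : Int) + 2 := by cases k <;> rfl

theorem pasB_of_lt : ∀ (k a : Nat), k < a → pasB k a = 0 := by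
  intro k
  induction k with
  | zero => intro a h; cases a with | zero => omega | succ a => rfl
  | succ k ih =>
    intro a h
    cases a with
    | zero => omega
    | succ a => simp [pasB, ih a (by omega), ih (a+1) (by omega)]

theorem wB_of_lt : ∀ (k a : Nat), k < a → wB k a = 0 := by
  intro k
  induction k with
  | zero => intro a h; cases a with | zero => omega | succ a => rfl
  | succ k ih =>
    intro a h
    cases a with
    | zero => omega
    | succ a =>
      simp [wB, ih (a+1) (by omega), pasB_of_lt k a (by omega), pasB_of_lt k (a+1) (by omega)]

-- ---- decomposing strings over {0..j} by the positions of the digit j ----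

theorem sum_tupAll_succ (b k : Nat) (G : List Int → Int) :
    ((tupAll b (k+1)).map G).sum
      = ((List.range b).map (fun d : Nat => ((tupAll b k).map (fun t => G ((d : Int) :: t))).sum)).sum := by
  show (((List.range b).flatMap _).map G).sum = _
  rw [List.map_flatMap]
  induction (List.range b) with
  | nil => rfl
  | cons d l ih =>
    simp only [List.flatMap_cons, List.sum_append, List.map_cons, List.sum_cons,
      List.map_map, Function.comp_def] at ih ⊢
    rw [ih]

theorem sum_map_sum_comm {α β : Type} (xs : List α) (ys : List β) (f : α → β → Int) :
    (xs.map (fun x => (ys.map (f x)).sum)).sum = (ys.map (fun y => (xs.map (fun x => f x y)).sum)).sum := by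
  induction xs with
  | nil => simp
  | cons x xs ih =>
    simp only [List.map_cons, List.sum_cons, ih]
    rw [← PySem.List.sum_map_add_int]

theorem SS_shift (j : Nat) (F : List Int → Int) (l : Nat) :
    SS j (fun s => ((List.range j).map (fun d : Nat => F ((d : Int) :: s))).sum) l = SS j F (l+1) := by
  unfold SS
  rw [sum_tupAll_succ]
  rw [sum_map_sum_comm]

-- ---- enumeration by integer decode = enumeration by digit strings ----

theorem sum_tup (b : Nat) (hb : 1 ≤ b) :
    ∀ (K : Nat) (W : List Int → Int),
      ∑ i ∈ Finset.range (b ^ K), W (tup b i K) = ((tupAll b K).map W).sum := by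
  intro K
  induction K with
  | zero => intro W; simp [tup, tupAll]
  | succ K ih =>
    intro W
    have hpos : 0 < b ^ K := by positivity
    rw [sum_tupAll_succ, list_range_map_sum]
    have hstep : ∀ d ∈ Finset.range b,
        ((tupAll b K).map (fun t => W ((d : Int) :: t))).sum
          = ∑ q ∈ Finset.range (b ^ K), W ((d : Int) :: tup b q K) :=
      fun d _ => (ih _).symm
    rw [Finset.sum_congr rfl hstep, ← Finset.sum_product']
    symm
    have hmod : ∀ p : Nat × Nat, p.1 < b → (p.1 + b * p.2) % b = p.1 := by
      intro p hp1
      rw [Nat.add_mul_mod_self_left, Nat.mod_eq_of_lt hp1]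
    have hdiv : ∀ p : Nat × Nat, p.1 < b → (p.1 + b * p.2) / b = p.2 := by
      intro p hp1
      rw [Nat.add_mul_div_left _ _ (by omega : 0 < b), Nat.div_eq_of_lt hp1]
      omega
    apply Finset.sum_nbij' (i := fun p : Nat × Nat => p.1 + b * p.2)
      (j := fun i' : Nat => (i' % b, i' / b))
    · intro p hp
      simp only [Finset.mem_product, Finset.mem_range] at hp
      simp only [Finset.mem_range]
      have h1 : p.1 + b * p.2 < b * b ^ K := by
        calc p.1 + b * p.2 < b + b * p.2 := by omega
          _ = b * (p.2 + 1) := by ring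
          _ ≤ b * b ^ K := Nat.mul_le_mul_left _ hp.2
      rw [pow_succ']
      exact h1
    · intro i' hi'
      simp only [Finset.mem_range] at hi'
      simp only [Finset.mem_product, Finset.mem_range]
      refine ⟨Nat.mod_lt _ (by omega), ?_⟩
      rw [Nat.div_lt_iff_lt_mul (by omega)]
      rw [pow_succ] at hi'
      omega
    · intro p hp
      simp only [Finset.mem_product, Finset.mem_range] at hp
      simp [hmod p hp.1, hdiv p hp.1]
    · intro i' _
      simp [Nat.mod_add_div]
    · intro p hp
      simp only [Finset.mem_product, Finset.mem_range] at hp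
      show W ((p.1 : Int) :: tup b p.2 K) = W (tup b (p.1 + b * p.2) (K+1))
      have : tup b (p.1 + b * p.2) (K+1)
          = (((p.1 + b * p.2) % b : Nat) : Int) :: tup b ((p.1 + b * p.2) / b) K := rfl
      rw [this, hmod p hp.1, hdiv p hp.1]

-- Pascal-recurrence algebra used by the inductive steps
theorem U_key (k : Nat) (G : Nat → Int) :
    ∑ a ∈ Finset.range (k+2), pasB (k+1) a * G (k+1-a)
      = ∑ a ∈ Finset.range (k+1), pasB k a * G (k-a+1)
        + ∑ a ∈ Finset.range (k+1), pasB k a * G (k-a) := by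
  rw [Finset.sum_range_succ' (fun a => pasB (k+1) a * G (k+1-a)) (k+1)]
  have h1 : ∀ a ∈ Finset.range (k+1), pasB (k+1) (a+1) * G (k+1-(a+1))
      = pasB k a * G (k-a) + pasB k (a+1) * G (k-a) := by
    intro a _
    rw [Nat.succ_sub_succ]
    show (pasB k a + pasB k (a+1)) * G (k-a) = _
    ring
  rw [Finset.sum_congr rfl h1, Finset.sum_add_distrib]
  have h2 : (∑ a ∈ Finset.range (k+1), pasB k (a+1) * G (k-a)) + pasB (k+1) 0 * G (k+1-0)
      = ∑ a ∈ Finset.range (k+1), pasB k a * G (k-a+1) := by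
    rw [Finset.sum_range_succ (fun a => pasB k (a+1) * G (k-a)) k,
        pasB_of_lt k (k+1) (by omega)]
    rw [Finset.sum_range_succ' (fun a => pasB k a * G (k-a+1)) k]
    have h3 : ∀ a ∈ Finset.range k, pasB k (a+1) * G (k-(a+1)+1) = pasB k (a+1) * G (k-a) := by
      intro a ha
      rw [Finset.mem_range] at ha
      congr 2
      omega
    rw [Finset.sum_congr rfl h3]
    show _ + 0 * G (k - k) + pasB (k+1) 0 * G (k+1-0) = _
    rw [pasB_zero, pasB_zero]
    ring_nf
    simp
  linarith [h2]

-- unweighted (Pascal) decomposition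
theorem U_lem (j : Nat) : ∀ (k : Nat) (F : List Int → Int),
    ((tupAll (j+1) k).map (fun t => F (strip (j : Int) t))).sum
      = ∑ a ∈ Finset.range (k+1), pasB k a * SS j F (k-a) := by
  intro k
  induction k with
  | zero =>
    intro F
    simp [tupAll, strip, SS, pasB]
  | succ k ih =>
    intro F
    rw [sum_tupAll_succ, List.range_succ, List.map_append, List.sum_append]
    have e2 : (([j].map (fun d : Nat => ((tupAll (j+1) k).map
          (fun t => F (strip (j:Int) ((d:Int) :: t)))).sum)).sum)
        = ∑ a ∈ Finset.range (k+1), pasB k a * SS j F (k-a) := by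
      rw [← ih F]
      simp [strip_cons]
    have e1 : ((List.range j).map (fun d : Nat => ((tupAll (j+1) k).map
          (fun t => F (strip (j:Int) ((d:Int) :: t)))).sum)).sum
        = ∑ a ∈ Finset.range (k+1), pasB k a * SS j F (k-a+1) := by
      have step1 : ∀ d ∈ List.range j, ((tupAll (j+1) k).map
            (fun t => F (strip (j:Int) ((d:Int) :: t)))).sum
          = ((tupAll (j+1) k).map (fun t => F ((d:Int) :: strip (j:Int) t))).sum := by
        intro d hd
        rw [List.mem_range] at hd
        apply congrArg List.sum
        apply List.map_congr_left
        intro t _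
        rw [strip_cons, if_neg (by exact_mod_cast Nat.ne_of_lt hd)]
      rw [List.map_congr_left step1]
      rw [sum_map_sum_comm (List.range j) (tupAll (j+1) k)
            (fun d t => F ((d:Int) :: strip (j:Int) t))]
      rw [ih (fun s => ((List.range j).map (fun d : Nat => F ((d : Int) :: s))).sum)]
      apply Finset.sum_congr rfl
      intro a _
      rw [SS_shift]
    rw [e1, e2, U_key k (SS j F)]

theorem V_key (k : Nat) (c : Int) (G : Nat → Int) :
    ∑ a ∈ Finset.range (k+2), (wB (k+1) a + c * pasB (k+1) a) * G (k+1-a)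
      = (∑ a ∈ Finset.range (k+1), (2 + c) * (pasB k a * G (k-a)))
        + ∑ a ∈ Finset.range (k+1), (wB k a + (c+1) * pasB k a) * G (k-a+1) := by
  rw [Finset.sum_range_succ' (fun a => (wB (k+1) a + c * pasB (k+1) a) * G (k+1-a)) (k+1)]
  have h1 : ∀ a ∈ Finset.range (k+1), (wB (k+1) (a+1) + c * pasB (k+1) (a+1)) * G (k+1-(a+1))
      = (2 + c) * (pasB k a * G (k-a))
        + (wB k (a+1) + (c+1) * pasB k (a+1)) * G (k-a) := by
    intro a _
    rw [Nat.succ_sub_succ]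
    show ((2 * pasB k a + wB k (a+1) + pasB k (a+1)) + c * (pasB k a + pasB k (a+1))) * G (k-a) = _
    ring
  rw [Finset.sum_congr rfl h1, Finset.sum_add_distrib]
  have h2 : (∑ a ∈ Finset.range (k+1), (wB k (a+1) + (c+1) * pasB k (a+1)) * G (k-a))
        + (wB (k+1) 0 + c * pasB (k+1) 0) * G (k+1-0)
      = ∑ a ∈ Finset.range (k+1), (wB k a + (c+1) * pasB k a) * G (k-a+1) := by
    rw [Finset.sum_range_succ (fun a => (wB k (a+1) + (c+1) * pasB k (a+1)) * G (k-a)) k,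
        pasB_of_lt k (k+1) (by omega), wB_of_lt k (k+1) (by omega)]
    rw [Finset.sum_range_succ' (fun a => (wB k a + (c+1) * pasB k a) * G (k-a+1)) k]
    have h3 : ∀ a ∈ Finset.range k, (wB k (a+1) + (c+1) * pasB k (a+1)) * G (k-(a+1)+1)
        = (wB k (a+1) + (c+1) * pasB k (a+1)) * G (k-a) := by
      intro a ha
      rw [Finset.mem_range] at ha
      congr 2
      omega
    rw [Finset.sum_congr rfl h3]
    have hw0 : wB (k+1) 0 = (k:Int) + 1 + 2 := by
      rw [wB_zero]
      push_cast
      ring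
    rw [hw0, wB_zero, pasB_zero, pasB_zero]
    simp only [Nat.sub_self, Nat.sub_zero]
    ring
  linarith [h2]

-- first-occurrence-weighted decomposition
theorem V_lem (j : Nat) : ∀ (k : Nat) (c : Int) (F : List Int → Int),
    ((tupAll (j+1) k).map (fun t => F (strip (j : Int) t) * (scanB (j : Int) t + 2 + c))).sum
      = ∑ a ∈ Finset.range (k+1), (wB k a + c * pasB k a) * SS j F (k-a) := by
  intro k
  induction k with
  | zero =>
    intro c F
    simp [tupAll, strip, SS, scanB, pasB, wB]
    ring
  | succ k ih =>
    intro c F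
    rw [sum_tupAll_succ, List.range_succ, List.map_append, List.sum_append]
    have e2 : (([j].map (fun d : Nat => ((tupAll (j+1) k).map
          (fun t => F (strip (j:Int) ((d:Int) :: t)) * (scanB (j:Int) ((d:Int) :: t) + 2 + c))).sum)).sum)
        = ∑ a ∈ Finset.range (k+1), (2 + c) * (pasB k a * SS j F (k-a)) := by
      have hscan : ∀ t : List Int, scanB (j:Int) (((j:Nat):Int) :: t) = 0 := by
        intro t
        simp [scanB]
      have hstrip : ∀ t : List Int, strip (j:Int) (((j:Nat):Int) :: t) = strip (j:Int) t := by
        intro t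
        rw [strip_cons, if_pos rfl]
      simp only [List.map_cons, List.map_nil, List.sum_cons, List.sum_nil, add_zero, hscan, hstrip]
      have : ∀ t ∈ tupAll (j+1) k, F (strip (j:Int) t) * (0 + 2 + c)
          = (2 + c) * F (strip (j:Int) t) := by
        intro t _
        ring
      rw [List.map_congr_left this]
      have hfac : ((tupAll (j+1) k).map (fun t => (2 + c) * F (strip (j:Int) t))).sum
          = (2 + c) * ((tupAll (j+1) k).map (fun t => F (strip (j:Int) t))).sum := by
        induction (tupAll (j+1) k) with
        | nil => simp
        | cons x l ihl =>
          simp only [List.map_cons, List.sum_cons, ihl]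
          ring
      rw [hfac, U_lem j k F, Finset.mul_sum]
    have e1 : ((List.range j).map (fun d : Nat => ((tupAll (j+1) k).map
          (fun t => F (strip (j:Int) ((d:Int) :: t)) * (scanB (j:Int) ((d:Int) :: t) + 2 + c))).sum)).sum
        = ∑ a ∈ Finset.range (k+1), (wB k a + (c+1) * pasB k a) * SS j F (k-a+1) := by
      have step1 : ∀ d ∈ List.range j, ((tupAll (j+1) k).map
            (fun t => F (strip (j:Int) ((d:Int) :: t)) * (scanB (j:Int) ((d:Int) :: t) + 2 + c))).sum
          = ((tupAll (j+1) k).map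
            (fun t => F ((d:Int) :: strip (j:Int) t) * (scanB (j:Int) t + 2 + (c+1)))).sum := by
        intro d hd
        rw [List.mem_range] at hd
        apply congrArg List.sum
        apply List.map_congr_left
        intro t _
        have hdj : ((d:Nat):Int) ≠ ((j:Nat):Int) := by exact_mod_cast Nat.ne_of_lt hd
        have hdle : ((d:Nat):Int) ≤ ((j:Nat):Int) := by exact_mod_cast Nat.le_of_lt hd
        rw [strip_cons, if_neg hdj]
        have : scanB (j:Int) (((d:Nat):Int) :: t) = 1 + scanB (j:Int) t := by
          simp [scanB, hdj, hdle]
        rw [this]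
        ring_nf
      rw [List.map_congr_left step1]
      rw [sum_map_sum_comm (List.range j) (tupAll (j+1) k)
            (fun d t => F ((d:Int) :: strip (j:Int) t) * (scanB (j:Int) t + 2 + (c+1)))]
      have hbeta : ∀ t ∈ tupAll (j+1) k,
          ((List.range j).map (fun d : Nat => F ((d:Int) :: strip (j:Int) t) * (scanB (j:Int) t + 2 + (c+1)))).sum
          = ((List.range j).map (fun d : Nat => F ((d:Int) :: strip (j:Int) t))).sum * (scanB (j:Int) t + 2 + (c+1)) := by
        intro t _
        induction (List.range j) with
        | nil => simp
        | cons x l ihl =>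
          simp only [List.map_cons, List.sum_cons, ihl]
          ring
      rw [List.map_congr_left hbeta]
      rw [ih (c+1) (fun s => ((List.range j).map (fun d : Nat => F ((d : Int) :: s))).sum)]
      apply Finset.sum_congr rfl
      intro a _
      rw [SS_shift]
    rw [e1, e2, V_key k c (SS j F)]
    ring

-- the single all-zero string of tupAll 1
theorem tupAll_one (k : Nat) : tupAll 1 k = [List.replicate k 0] := by
  induction k with
  | zero => rfl
  | succ k ih => simp [tupAll, ih, List.replicate_succ]

-- sum of A's weights over all strings over {0..j} = B's DP table
theorem L_lem (j : Nat) : ∀ (k : Nat),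
    ((tupAll (j+1) k).map (Pprod j)).sum = Dp j k := by
  induction j with
  | zero =>
    intro k
    simp [tupAll_one, Pprod, Dp]
  | succ j ih =>
    intro k
    have hP : ∀ t ∈ tupAll (j+2) k, Pprod (j+1) t
        = Pprod j (strip ((j+1 : Nat) : Int) t) * (scanB ((j+1 : Nat) : Int) t + 2 + 0) := by
      intro t _
      rw [Pprod_succ]
      rw [← Pprod_strip j ((j+1 : Nat) : Int) (by push_cast; omega) t]
      have : (1 + (j : Int)) = ((j+1 : Nat) : Int) := by push_cast; ring
      rw [this, add_zero]
    rw [List.map_congr_left hP]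
    rw [V_lem (j+1) k 0 (Pprod j)]
    have hSS : ∀ a ∈ Finset.range (k+1), (wB k a + 0 * pasB k a) * SS (j+1) (Pprod j) (k-a)
        = wB k a * Dp j (k-a) := by
      intro a _
      rw [SS, ih (k-a)]
      ring
    rw [Finset.sum_congr rfl hSS]
    show _ = ∑ l ∈ Finset.range (k+1), Dp j l * wB k (k-l)
    rw [← Finset.sum_range_reflect (fun l => Dp j l * wB k (k-l)) (k+1)]
    apply Finset.sum_congr rfl
    intro a ha
    rw [Finset.mem_range] at ha
    have h1 : k + 1 - 1 - a = k - a := by omega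
    have h2 : k - (k - a) = a := by omega
    rw [h1, h2]
    ring

-- ---- A-side glue ----

theorem foldl_mul_eq_prod (xs : List Int) (x : Int) :
    xs.foldl (· * ·) x = x * xs.prod := by
  induction xs generalizing x with
  | nil => simp
  | cons y ys ih => simp [List.foldl_cons, ih]; ring

theorem reduce1_eq_prod (N : Nat) (hN : 1 ≤ N) (h : Nat → Int) :
    reduce1 (· * ·) ((List.range N).map h) = ((List.range N).map h).prod := by
  obtain ⟨N', rfl⟩ : ∃ N', N = N' + 1 := ⟨N - 1, by omega⟩
  rw [List.range_succ_eq_map]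
  simp only [List.map_cons, reduce1, List.prod_cons]
  rw [foldl_mul_eq_prod]

-- ---- B-side glue ----

theorem dp_iterate (M : Nat) : ∀ (j : Nat),
    (fun dp : List Int => (List.range (M+1)).map
        (fun k => ((List.range (k+1)).map (fun l => dp.getD l 0 * wB k (k-l))).sum))^[j]
      (List.replicate (M+1) (1:Int))
    = (List.range (M+1)).map (Dp j) := by
  intro j
  induction j with
  | zero =>
    rw [Function.iterate_zero, id]
    have : (List.range (M+1)).map (Dp 0) = (List.range (M+1)).map (fun _ => (1:Int)) :=
      List.map_congr_left (fun k _ => rfl)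
    rw [this, List.map_const', List.length_range]
  | succ j ih =>
    rw [Function.iterate_succ_apply', ih]
    apply List.map_congr_left
    intro k hk
    rw [List.mem_range] at hk
    have hin : ∀ l ∈ List.range (k+1),
        ((List.range (M+1)).map (Dp j)).getD l 0 * wB k (k-l) = Dp j l * wB k (k-l) := by
      intro l hl
      rw [List.mem_range] at hl
      rw [PySem.List.getD_map_range _ _ _ _ (by omega)]
    rw [List.map_congr_left hin, list_range_map_sum]
    rfl

-- ===== VERDICT (by name: the statement is the Claim_ definition above) =====
theorem count_valid_edge_sets_spec : Claim_equal_count_valid_edge_sets := by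
  intro m n _ hP
  obtain ⟨hm, hn⟩ := hP
  unfold Spec_count_valid_edge_sets count_valid_edge_sets count_valid_edge_sets_alt
  by_cases h0 : n = 0
  · simp [h0]
  · simp only [if_neg h0]
    obtain ⟨N, rfl⟩ : ∃ N : Nat, n = (N : Int) := ⟨n.toNat, by omega⟩
    obtain ⟨M, rfl⟩ : ∃ M : Nat, m = (M : Int) := ⟨m.toNat, by omega⟩
    have hN1 : 1 ≤ N := by
      by_contra hc
      exact h0 (by omega : (N : Int) = 0)
    have hMt : ((M : Int)).toNat = M := Int.toNat_natCast M
    have hBcast : ((N : Int) + 2) = (((N + 2 : Nat) : Nat) : Int) := by push_cast; ring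
    have hpow : (((N : Int) + 2) ^ ((M : Int)).toNat) = (((N + 2) ^ M : Nat) : Int) := by
      rw [hBcast, hMt]
      push_cast
      ring
    -- ---- A side ----
    rw [hpow, hBcast, hMt]
    rw [PySem.List.pyRange_zero_nat, List.foldl_map]
    rw [PySem.List.foldl_add (l := List.range ((N + 2) ^ M))
      (g := fun i : Nat => reduce1 (· * ·)
        ((PySem.List.pyRange 1 ((N : Int) + 1) 1).map
          (fun j => countA (i : Int) j (((N + 2 : Nat) : Nat) : Int) (M : Int)))) (a := 0)]
    rw [zero_add, list_range_map_sum]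
    have hperi : ∀ i ∈ Finset.range ((N + 2) ^ M),
        reduce1 (· * ·) ((PySem.List.pyRange 1 ((N : Int) + 1) 1).map
            (fun j => countA (i : Int) j (((N + 2 : Nat) : Nat) : Int) (M : Int)))
          = Pprod N (tup (N + 2) i M) := by
      intro i hi
      rw [Finset.mem_range] at hi
      have hr : PySem.List.pyRange 1 ((N : Int) + 1) 1
          = (List.range N).map (fun k : Nat => 1 + (k : Int)) := by
        rw [PySem.List.pyRange_one]
        norm_num
      rw [hr, List.map_map]
      rw [reduce1_eq_prod N hN1]
      unfold Pprod
      congr 1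
      apply List.map_congr_left
      intro k hk
      rw [List.mem_range] at hk
      show countA (i : Int) (1 + (k : Int)) (((N + 2 : Nat) : Nat) : Int) (M : Int) = _
      rw [countA_eq_scan (N + 2) (by omega) M i hi (1 + (k : Int)) (by omega)]
    rw [Finset.sum_congr rfl hperi]
    rw [sum_tup (N + 2) (by omega) M (Pprod N)]
    have hstripped : ∀ t ∈ tupAll (N + 2) M,
        Pprod N t = Pprod N (strip ((N + 1 : Nat) : Int) t) :=
      fun t _ => (Pprod_strip N ((N + 1 : Nat) : Int) (by push_cast; omega) t).symm
    rw [List.map_congr_left hstripped]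
    rw [U_lem (N + 1) M (Pprod N)]
    have hSS : ∀ a ∈ Finset.range (M + 1),
        pasB M a * SS (N + 1) (Pprod N) (M - a) = pasB M a * Dp N (M - a) := by
      intro a _
      rw [SS, L_lem N (M - a)]
    rw [Finset.sum_congr rfl hSS]
    -- ---- B side ----
    have hM1 : (((M : Int)) + 1).toNat = M + 1 := by omega
    rw [hM1, foldl_iterate]
    have hlen : (PySem.List.pyRange 0 (N : Int) 1).length = N := by
      rw [PySem.List.length_pyRange_one]
      omega
    rw [hlen, dp_iterate M N]
    have hfin : ∀ k ∈ List.range (M + 1),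
        pasB M (M - k) * ((List.range (M + 1)).map (Dp N)).getD k 0
          = pasB M (M - k) * Dp N k := by
      intro k hk
      rw [List.mem_range] at hk
      rw [PySem.List.getD_map_range _ _ _ _ hk]
    rw [List.map_congr_left hfin, list_range_map_sum]
    rw [← Finset.sum_range_reflect (fun k => pasB M (M - k) * Dp N k) (M + 1)]
    apply Finset.sum_congr rfl
    intro a ha
    rw [Finset.mem_range] at ha
    have h1 : M + 1 - 1 - a = M - a := by omega
    have h2 : M - (M - a) = a := by omega
    rw [h1, h2]
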